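-- pv_equiv track=rewrite | github.com/pypi-data/pypi-mirror-252 | packages/codemod2/codemod2-0.2.4.tar.gz/codemod2-0.2.4/codemod2/base.py | _index_to_row_col
-- ===== SOURCE A (Python) =====
-- def _index_to_row_col(lines, index):
--     r"""
--     >>> lines = ['hello\n', 'world\n']
--     >>> _index_to_row_col(lines, 0)
--     (0, 0)
--     >>> _index_to_row_col(lines, 6)
--     (1, 0)
--     >>> _index_to_row_col(lines, 7)
--     (1, 1)
--     """
--     if index < 0:
--         raise IndexError("negative index")
--     current_index = 0
--     for line_number, line in enumerate(lines):
--         line_length = len(line)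
--         if current_index + line_length > index:
--             return line_number, index - current_index
--         current_index += line_length
--     raise IndexError(f"index {index} out of range")
-- ===== SOURCE B (Python) =====
-- import bisect
-- import itertools
--
-- def _index_to_row_col(lines, index):
--     if index < 0:
--         raise IndexError("negative index")
--     cum = list(itertools.accumulate(map(len, lines)))
--     i = bisect.bisect_right(cum, index)
--     if i >= len(cum):
--         raise IndexError(f"index {index} out of range")
--     return i, index - (cum[i - 1] if i else 0)
-- ===== Notes on version B (the rewrite author's own statement) =====
-- stated objective: alternative
-- what changed: Replaces the running-total linear scan with a prefix-sum table (itertools.accumulate) plus binary search (bisect.bisect_right) to locate the row.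
import Mathlib
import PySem

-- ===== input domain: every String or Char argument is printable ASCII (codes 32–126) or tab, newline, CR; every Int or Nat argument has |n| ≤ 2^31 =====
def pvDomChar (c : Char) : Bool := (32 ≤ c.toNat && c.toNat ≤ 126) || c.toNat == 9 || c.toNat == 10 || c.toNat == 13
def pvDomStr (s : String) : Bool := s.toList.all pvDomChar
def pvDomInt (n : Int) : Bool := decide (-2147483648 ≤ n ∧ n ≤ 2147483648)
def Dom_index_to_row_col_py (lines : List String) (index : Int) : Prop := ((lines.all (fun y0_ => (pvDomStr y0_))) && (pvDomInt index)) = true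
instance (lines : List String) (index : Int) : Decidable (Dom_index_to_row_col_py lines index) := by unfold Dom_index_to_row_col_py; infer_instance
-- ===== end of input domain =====

-- B replaces A's running-total linear scan with a prefix-sum table plus bisect_right
-- binary search (objective: alternative).  Both Pythons raise IndexError exactly outside
-- Pre_ (negative index, or index past the total length); the ports return (0, 0) there,
-- and Pre_ excludes those inputs.

-- ===== PORT A =====
-- A's enumerate loop with running total current_index; none = the final IndexError raise.
def goA (index : Int) : List String → Int → Int → Option (Int × Int)
  | [], _, _ => none
  | l :: rest, ln, cur =>
    if cur + PySem.Str.len l > index then some (ln, index - cur)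
    else goA index rest (ln + 1) (cur + PySem.Str.len l)

def index_to_row_col_py (lines : List String) (index : Int) : Int × Int :=
  if index < 0 then (0, 0)  -- Python: raise IndexError("negative index"); excluded by Pre_
  else (goA index lines 0 0).getD (0, 0)  -- none: raise IndexError("... out of range"); excluded by Pre_

-- ===== PORT B =====
-- itertools.accumulate(map(len, lines)) of Source B.
def pyAccum (ls : List Int) (acc : Int) : List Int :=
  match ls with
  | [] => []
  | a :: rest => (acc + a) :: pyAccum rest (acc + a)

def index_to_row_col_py_alt (lines : List String) (index : Int) : Int × Int :=
  if index < 0 then (0, 0)  -- Python: raise IndexError("negative index"); excluded by Pre_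
  else
    let cum := pyAccum (lines.map PySem.Str.len) 0
    let i := PySem.List.bisectRight cum index
    if cum.length ≤ i then (0, 0)  -- Python: raise IndexError("... out of range"); excluded by Pre_
    else ((i : Int), index - (if i = 0 then 0 else cum.getD (i - 1) 0))

-- ===== PRECONDITION & SPEC =====
-- Pre_ = exactly where Python A returns: 0 ≤ index and index below the total character count
-- (otherwise A raises IndexError).
def Pre_index_to_row_col_py (lines : List String) (index : Int) : Prop :=
  0 ≤ index ∧ index < (lines.map PySem.Str.len).sum
instance (lines : List String) (index : Int) : Decidable (Pre_index_to_row_col_py lines index) := by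
  unfold Pre_index_to_row_col_py; infer_instance

def pvWitness_index_to_row_col_py : List String × Int := (["hello\n", "world\n"], 7)

def Spec_index_to_row_col_py (lines : List String) (index : Int) (out : Int × Int) : Prop := out = index_to_row_col_py_alt lines index
instance (lines : List String) (index : Int) (out : Int × Int) : Decidable (Spec_index_to_row_col_py lines index out) := by unfold Spec_index_to_row_col_py; infer_instance

-- ===== CLAIM (what is proved, stated in full; the proofs are below) =====
def Claim_equal_index_to_row_col_py : Prop := ∀ (lines : List String) (index : Int), Dom_index_to_row_col_py lines index → Pre_index_to_row_col_py lines index → Spec_index_to_row_col_py lines index (index_to_row_col_py lines index)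

-- ===== LEMMAS AND PROOFS =====

theorem pyAccum_base_le_mem (ls : List Int) (acc b : Int) (hnn : ∀ l ∈ ls, 0 ≤ l)
    (hb : b ∈ pyAccum ls acc) : acc ≤ b := by
  induction ls generalizing acc with
  | nil => simp [pyAccum] at hb
  | cons a rest ih =>
    have ha : 0 ≤ a := hnn a (by simp)
    simp only [pyAccum, List.mem_cons] at hb
    rcases hb with h | h
    · omega
    · have := ih (acc + a) (fun l hl => hnn l (List.mem_cons_of_mem _ hl)) h
      omega

theorem pyAccum_pairwise (ls : List Int) (acc : Int) (hnn : ∀ l ∈ ls, 0 ≤ l) :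
    List.Pairwise (fun x1 x2 => x1 ≤ x2) (pyAccum ls acc) := by
  induction ls generalizing acc with
  | nil => simp [pyAccum]
  | cons a rest ih =>
    refine List.Pairwise.cons ?_ (ih (acc + a) (fun l hl => hnn l (List.mem_cons_of_mem _ hl)))
    intro b hb
    exact pyAccum_base_le_mem rest (acc + a) b (fun l hl => hnn l (List.mem_cons_of_mem _ hl)) hb

theorem pyAccum_sum_mem (ls : List Int) (acc : Int) (h : ls ≠ []) :
    acc + ls.sum ∈ pyAccum ls acc := by
  induction ls generalizing acc with
  | nil => exact absurd rfl h
  | cons a rest ih =>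
    by_cases hr : rest = []
    · subst hr; simp [pyAccum]
    · simp only [pyAccum, List.sum_cons, List.mem_cons]
      right
      have h2 := ih (acc + a) hr
      rw [← add_assoc]
      exact h2

-- takeWhile facts (getD form)
theorem takeWhile_getD {p : Int → Bool} (l : List Int) (j : Nat)
    (hj : j < (l.takeWhile p).length) : p (l.getD j 0) = true := by
  induction l generalizing j with
  | nil => simp [List.takeWhile] at hj
  | cons a rest ih =>
    by_cases hp : p a
    · simp only [List.takeWhile_cons, hp, if_true, List.length_cons] at hj
      cases j with
      | zero => simpa using hp
      | succ k => exact ih k (by omega)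
    · simp [hp] at hj

theorem takeWhile_stop {p : Int → Bool} (l : List Int)
    (h : (l.takeWhile p).length < l.length) :
    p (l.getD (l.takeWhile p).length 0) = false := by
  induction l with
  | nil => simp at h
  | cons a rest ih =>
    by_cases hp : p a
    · simp only [List.takeWhile_cons, hp, if_true, List.length_cons] at h ⊢
      exact ih (by omega)
    · simp [hp]

theorem takeWhile_len_le {p : Int → Bool} (l : List Int) :
    (l.takeWhile p).length ≤ l.length :=
  (l.takeWhile_prefix p).length_le

-- bisect_right on a sorted list is the length of the ≤-x prefix
theorem bisectRight_eq_takeWhile (cum : List Int) (x : Int)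
    (hpw : List.Pairwise (fun x1 x2 => x1 ≤ x2) cum) :
    PySem.List.bisectRight cum x = (cum.takeWhile (fun c => decide (c ≤ x))).length := by
  obtain ⟨hle, hlo, hhi⟩ := PySem.List.bisectRight_spec cum x hpw
  set b := PySem.List.bisectRight cum x with hb
  set n := (cum.takeWhile (fun c => decide (c ≤ x))).length with hn
  have hnle : n ≤ cum.length := takeWhile_len_le cum
  rcases lt_trichotomy b n with h | h | h
  · -- b < n : cum[b] ≤ x (takeWhile) but x < cum[b] (spec)
    have hblen : b < cum.length := lt_of_lt_of_le h hnle
    have h1 : ((cum.getD b 0 : Int) ≤ x) := by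
      have := takeWhile_getD (p := fun c => decide (c ≤ x)) cum b (hn ▸ h)
      simpa using this
    have h2 := hhi b hblen (le_refl b)
    rw [List.getD_eq_getElem cum 0 hblen] at h1
    omega
  · exact h
  · -- n < b : cum[n] ≤ x (spec) but takeWhile stopped at n
    have hnlen : n < cum.length := lt_of_lt_of_le h hle
    have h1 := hlo n hnlen h
    have h2 : ¬ ((cum.getD n 0 : Int) ≤ x) := by
      have := takeWhile_stop (p := fun c => decide (c ≤ x)) cum (hn ▸ hnlen)
      simpa using this
    rw [List.getD_eq_getElem cum 0 hnlen] at h2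
    omega

theorem cons_getD_pred (a : Int) (t : List Int) (k : Nat) (base : Int) :
    (if k + 1 = 0 then base else (a :: t).getD (k + 1 - 1) 0) =
    (if k = 0 then a else t.getD (k - 1) 0) := by
  cases k with
  | zero => simp
  | succ m => simp

-- characterization of A's loop via the prefix-sum list
theorem goA_eq (ls : List String) (index ln cur : Int) :
    goA index ls ln cur =
      (let cum := pyAccum (ls.map PySem.Str.len) cur
       let n := (cum.takeWhile (fun c => decide (c ≤ index))).length
       if n < cum.length then
         some ((ln + (n : Int)), index - (if n = 0 then cur else cum.getD (n - 1) 0))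
       else none) := by
  induction ls generalizing ln cur with
  | nil => simp [goA, pyAccum]
  | cons l rest ih =>
    simp only [goA, List.map_cons, pyAccum]
    by_cases hc : cur + PySem.Str.len l > index
    · have hd : ¬ (decide ((cur + PySem.Str.len l) ≤ index) = true) := by
        rw [decide_eq_true_eq]; omega
      rw [if_pos hc, List.takeWhile_cons, if_neg hd]
      simp
    · have hd : decide ((cur + PySem.Str.len l) ≤ index) = true := by
        rw [decide_eq_true_eq]; omega
      rw [if_neg hc, ih]
      have htw : List.takeWhile (fun c => decide (c ≤ index))
          ((cur + PySem.Str.len l) :: pyAccum (rest.map PySem.Str.len) (cur + PySem.Str.len l)) =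
          (cur + PySem.Str.len l) ::
            List.takeWhile (fun c => decide (c ≤ index))
              (pyAccum (rest.map PySem.Str.len) (cur + PySem.Str.len l)) := by
        rw [List.takeWhile_cons, if_pos hd]
      simp only [htw, List.length_cons]
      set tail := pyAccum (rest.map PySem.Str.len) (cur + PySem.Str.len l) with htail
      set n' := (tail.takeWhile (fun c => decide (c ≤ index))).length with hn'
      by_cases hlt : n' < tail.length
      · rw [if_pos hlt, if_pos (by omega : n' + 1 < tail.length + 1)]
        rw [Option.some.injEq, Prod.mk.injEq]
        refine ⟨by push_cast; ring, ?_⟩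
        rw [cons_getD_pred]
      · rw [if_neg hlt, if_neg (by omega : ¬ n' + 1 < tail.length + 1)]

-- ===== VERDICT (by name: the statement is the Claim_ definition above) =====
theorem index_to_row_col_py_spec : Claim_equal_index_to_row_col_py := by
  intro lines index _ hpre
  obtain ⟨h0, hlt⟩ := hpre
  unfold Spec_index_to_row_col_py index_to_row_col_py index_to_row_col_py_alt
  rw [if_neg (by omega : ¬ index < 0), if_neg (by omega : ¬ index < 0)]
  set lens := lines.map PySem.Str.len with hlens
  have hnn : ∀ l ∈ lens, 0 ≤ l := by
    intro l hl
    rw [hlens] at hl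
    obtain ⟨s, _, rfl⟩ := List.mem_map.mp hl
    rw [PySem.Str.len_eq]
    positivity
  set cum := pyAccum lens 0 with hcum
  set n := (cum.takeWhile (fun c => decide (c ≤ index))).length with hn
  have hbr : PySem.List.bisectRight cum index = n :=
    bisectRight_eq_takeWhile cum index (pyAccum_pairwise lens 0 hnn)
  have hlsne : lens ≠ [] := by
    intro h
    rw [h] at hlt
    simp at hlt
    omega
  have hnlt : n < cum.length := by
    by_contra hge
    have hnle : n ≤ cum.length := takeWhile_len_le cum
    have heq : n = cum.length := by omega
    have hmem : (0 + lens.sum) ∈ cum := pyAccum_sum_mem lens 0 hlsne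
    obtain ⟨j, hj, hjv⟩ := List.mem_iff_getElem.mp hmem
    have := takeWhile_getD (p := fun c => decide (c ≤ index)) cum j (by omega)
    rw [List.getD_eq_getElem cum 0 hj, hjv] at this
    simp at this
    omega
  rw [goA_eq]
  simp only [← hlens, ← hcum, ← hn, if_pos hnlt, Option.getD_some, hbr,
    if_neg (by omega : ¬ cum.length ≤ n)]
  simp
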